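-- pv_equiv track=rewrite | github.com/emersonsoaresdasilva/emersonsoaresdasilva | Python/The Varieties/2021.1/exercícios_complexidade_de_tempo.py | funcao3
-- ===== SOURCE A (Python) =====
-- def funcao3(a, b):
--     cont = 0                                        # 1
--     for i in range(a):                              # n
--         for j in range(a):                          # n²
--             cont = cont + 1     # linha 1           # n²
--     for i in range(b):                              # n
--         cont = cont + 1         # linha 2           # n
--     return cont                                     # 1
-- ===== SOURCE B (Python) =====
-- def funcao3(a, b):
--     # closed form: the nested loops add a*a (when a>0), the last loop adds b (when b>0)
--     return (a * a if a > 0 else 0) + (b if b > 0 else 0)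
-- ===== Notes on version B (the rewrite author's own statement) =====
-- stated objective: faster
-- what changed: Replaces the O(a^2+b) counting loops by the closed form (a*a if a>0 else 0)+(b if b>0 else 0).
import Mathlib
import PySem

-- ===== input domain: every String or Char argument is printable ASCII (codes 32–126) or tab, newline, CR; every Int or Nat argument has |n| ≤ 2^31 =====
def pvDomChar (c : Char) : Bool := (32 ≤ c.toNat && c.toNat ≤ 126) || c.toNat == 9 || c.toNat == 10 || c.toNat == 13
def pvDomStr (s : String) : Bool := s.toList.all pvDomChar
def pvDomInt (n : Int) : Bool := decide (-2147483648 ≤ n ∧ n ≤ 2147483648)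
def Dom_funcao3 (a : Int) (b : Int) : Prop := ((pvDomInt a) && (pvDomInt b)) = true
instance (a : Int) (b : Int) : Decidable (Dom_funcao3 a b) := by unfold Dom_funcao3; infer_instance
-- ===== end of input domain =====

-- ===== PORT A =====
-- B: closed form instead of the counting loops (O(1) instead of O(a^2+b)).
def funcao3 (a : Int) (b : Int) : Int :=
  let cont : Int := 0
  let cont := (PySem.List.pyRange 0 a 1).foldl
    (fun cont _i => (PySem.List.pyRange 0 a 1).foldl (fun c _j => c + 1) cont) cont
  let cont := (PySem.List.pyRange 0 b 1).foldl (fun c _i => c + 1) cont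
  cont

-- ===== PORT B =====
def funcao3_alt (a : Int) (b : Int) : Int :=
  (if a > 0 then a * a else 0) + (if b > 0 then b else 0)

-- ===== PRECONDITION & SPEC =====
def Spec_funcao3 (a : Int) (b : Int) (out : Int) : Prop := out = funcao3_alt a b
instance (a : Int) (b : Int) (out : Int) : Decidable (Spec_funcao3 a b out) := by unfold Spec_funcao3; infer_instance

-- ===== CLAIM (what is proved, stated in full; the proofs are below) =====
def Claim_equal_funcao3 : Prop := ∀ (a : Int) (b : Int), Dom_funcao3 a b → Spec_funcao3 a b (funcao3 a b)

-- ===== LEMMAS AND PROOFS =====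

-- ===== VERDICT (by name: the statement is the Claim_ definition above) =====
-- counting loop: each step adds 1
theorem foldl_add_one (xs : List Int) (c : Int) :
    xs.foldl (fun c _ => c + 1) c = c + xs.length := by
  induction xs generalizing c with
  | nil => simp
  | cons x t ih => simp [List.foldl, ih]; ring

theorem foldl_add_const (xs : List Int) (k c : Int) :
    xs.foldl (fun c _ => c + k) c = c + xs.length * k := by
  induction xs generalizing c with
  | nil => simp
  | cons x t ih => simp [List.foldl, ih]; ring

theorem funcao3_spec : Claim_equal_funcao3 := by
  intro a b _
  unfold Spec_funcao3 funcao3 funcao3_alt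
  simp only [foldl_add_one, foldl_add_const, PySem.List.length_pyRange_one]
  rcases le_or_gt a 0 with h | h
  · simp [Int.toNat_of_nonpos h, not_lt.2 h]; split <;> omega
  · have ha : ((a.toNat : Int)) = a := Int.toNat_of_nonneg h.le
    simp [ha, h]; split <;> omega
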